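-- pv_equiv track=rewrite | github.com/chan-98/bioinformatics-algorithms | msa-statistics-calculation.py | get_conservation_category
-- ===== SOURCE A (Python) =====
-- def get_conservation_category(column: str) -> str:
--     """Determine conservation category for a column"""
--     non_gaps = [c for c in column if c != '-']
--
--     if len(non_gaps) == 0:
--         return "GAP_ONLY"
--
--     unique = set(non_gaps)
--     if len(unique) == 1:
--         return "CONSERVED"
--     else:
--         return "VARIABLE"
-- ===== SOURCE B (Python) =====
-- def get_conservation_category(column: str) -> str:
--     """Determine conservation category for a column (single pass, running state)"""
--     first_char = None
--     all_same = True
--     for c in column: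
--         if c == '-':
--             continue
--         if first_char is None:
--             first_char = c
--         elif c != first_char:
--             all_same = False
--     if first_char is None:
--         return "GAP_ONLY"
--     return "CONSERVED" if all_same else "VARIABLE"
-- ===== Notes on version B (the rewrite author's own statement) =====
-- stated objective: simpler
-- what changed: Single pass maintaining a sentinel first_char and an all_same flag instead of building a filtered list and then a set; no intermediate collections.
import Mathlib
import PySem

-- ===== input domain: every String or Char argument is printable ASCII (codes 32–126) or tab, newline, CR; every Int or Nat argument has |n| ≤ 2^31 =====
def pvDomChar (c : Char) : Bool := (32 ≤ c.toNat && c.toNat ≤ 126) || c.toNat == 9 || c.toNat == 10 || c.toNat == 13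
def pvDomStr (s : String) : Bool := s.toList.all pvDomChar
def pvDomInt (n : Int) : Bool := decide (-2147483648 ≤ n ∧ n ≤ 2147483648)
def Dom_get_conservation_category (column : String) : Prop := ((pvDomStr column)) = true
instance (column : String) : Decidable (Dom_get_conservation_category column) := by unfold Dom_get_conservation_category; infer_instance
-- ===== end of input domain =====

-- B replaces A's filtered-list-then-set construction with a single pass holding a sentinel
-- and a flag (objective: simpler — no intermediate collections).

-- ===== PORT A =====
def get_conservation_category (column : String) : String :=
  let non_gaps := column.toList.filter (fun c => c ≠ '-')
  if non_gaps.length = 0 then "GAP_ONLY"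
  else
    let unique : PySem.Set Char := PySem.Set.ofList non_gaps
    if PySem.Set.len unique = 1 then "CONSERVED" else "VARIABLE"

-- ===== PORT B =====
def gccStep (s : Option Char × Bool) (c : Char) : Option Char × Bool :=
  if c = '-' then s
  else
    match s.1 with
    | none => (some c, s.2)
    | some f => (some f, s.2 && (c == f))

def get_conservation_category_alt (column : String) : String :=
  let st := column.toList.foldl gccStep (none, true)
  match st.1 with
  | none => "GAP_ONLY"
  | some _ => if st.2 then "CONSERVED" else "VARIABLE"

-- ===== PRECONDITION & SPEC =====
def Spec_get_conservation_category (column : String) (out : String) : Prop := out = get_conservation_category_alt column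
instance (column : String) (out : String) : Decidable (Spec_get_conservation_category column out) := by unfold Spec_get_conservation_category; infer_instance

-- ===== CLAIM (what is proved, stated in full; the proofs are below) =====
def Claim_equal_get_conservation_category : Prop := ∀ (column : String), Dom_get_conservation_category column → Spec_get_conservation_category column (get_conservation_category column)

-- ===== LEMMAS AND PROOFS =====

-- the fold ignores gap characters: folding l equals folding its gap-free filtration
theorem gcc_foldl_filter (l : List Char) (s : Option Char × Bool) :
    l.foldl gccStep s = (l.filter (fun c => c ≠ '-')).foldl gccStep s := by
  induction l generalizing s with
  | nil => rfl
  | cons a t ih =>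
    by_cases ha : a = '-'
    · simp [ha, gccStep, ih]
    · simp [ha, ih]

-- once a first char f is fixed, the flag records whether every later non-gap char equals f
theorem gcc_foldl_some (l : List Char) (f : Char) (b : Bool) :
    l.foldl gccStep (some f, b) =
      (some f, b && l.all (fun c => c = '-' || c == f)) := by
  induction l generalizing b with
  | nil => simp
  | cons a t ih =>
    by_cases ha : a = '-'
    · simp [ha, gccStep, ih]
    · simp [ha, gccStep, ih, Bool.and_assoc]

-- length monotonicity of set insertion along a fold
theorem len_le_foldl_add (l : List Char) (s : PySem.Set Char) :
    s.length ≤ (l.foldl PySem.Set.add s).length := by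
  induction l generalizing s with
  | nil => simp
  | cons a t ih =>
    refine le_trans ?_ (ih (PySem.Set.add s a))
    simp [PySem.Set.add]
    split <;> simp
  
-- a gap-free tail satisfies the two all-predicates equally
theorem all_gapfree (t : List Char) (a : Char) (h : ∀ c ∈ t, c ≠ '-') :
    t.all (fun c => c = '-' || c == a) = t.all (fun c => c == a) := by
  induction t with
  | nil => rfl
  | cons c r ih => simp_all

-- the singleton-set criterion: set(a :: t) has one element iff every element of t equals a
theorem ofList_len_one (a : Char) (t : List Char) :
    ((t.foldl PySem.Set.add [a]).length = 1) = (t.all (fun c => c == a)) := by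
  induction t with
  | nil => simp
  | cons c t ih =>
    by_cases hc : c = a
    · simp [hc, PySem.Set.add, PySem.Set.contains, ih]
    · have h2 : (2 : ℕ) ≤ (t.foldl PySem.Set.add [a, c]).length :=
        len_le_foldl_add t [a, c]
      simp [PySem.Set.add, PySem.Set.contains, hc]
      omega

-- ===== VERDICT (by name: the statement is the Claim_ definition above) =====
theorem get_conservation_category_spec : Claim_equal_get_conservation_category := by
  intro column _
  unfold Spec_get_conservation_category get_conservation_category get_conservation_category_alt
  rw [gcc_foldl_filter]
  cases hng : column.toList.filter (fun c => c ≠ '-') with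
  | nil => simp
  | cons a t =>
    have hat : ∀ c ∈ a :: t, c ≠ '-' := by
      rw [← hng]
      intro c hc
      simpa using List.of_mem_filter hc
    have ha : a ≠ '-' := hat a (by simp)
    have ht : t.all (fun c => c = '-' || c == a) = t.all (fun c => c == a) :=
      all_gapfree t a (fun c hc => hat c (List.mem_cons_of_mem a hc))
    have hstep : gccStep (none, true) a = (some a, true) := by simp [gccStep, ha]
    simp only [List.foldl_cons, hstep]
    rw [gcc_foldl_some]
    simp only [Bool.true_and, ht]
    have hset : PySem.Set.ofList (a :: t) = t.foldl PySem.Set.add [a] := by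
      simp [PySem.Set.ofList_eq_foldl, PySem.Set.add]
    simp [PySem.Set.len, hset, ofList_len_one]
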